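-- pv_equiv track=rewrite | github.com/LLprod39/WebTerm | servers/terminal_ai.py | compute_report_status
-- ===== SOURCE A (Python) =====
-- from typing import Any
--
-- def compute_report_status(done_items: list[dict[str, Any]]) -> str:
--     """Compute summary status from a list of executed command results."""
--     codes = [item.get("exit_code") for item in done_items]
--     non_captured = [c for c in codes if c != 130]
--     if non_captured and all(c == 0 for c in non_captured if c is not None):
--         return "ok"
--     if any(c not in (None, 0, 130) for c in codes):
--         ok_count = sum(1 for c in codes if c in (0, 130))
--         return "error" if ok_count < len(codes) / 2 else "warning"
--     return "warning"
-- ===== SOURCE B (Python) =====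
-- def compute_report_status(done_items: list[dict[str, "Any"]]) -> str:
--     """Compute summary status from a list of executed command results."""
--     # Build a frequency table of exit codes once; every question A answers by
--     # rescanning the code list is then a constant number of dict lookups.
--     freq = {}
--     for item in done_items:
--         c = item.get("exit_code")
--         freq[c] = freq.get(c, 0) + 1
--     n = len(done_items)
--     n130 = freq.get(130, 0)
--     good = freq.get(0, 0) + n130          # codes in (0, 130)
--     n_err = n - good - freq.get(None, 0)  # everything else is an error code
--     if n > n130 and n_err == 0:
--         return "ok"
--     if n_err > 0:
--         return "error" if good * 2 < n else "warning"
--     return "warning"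
-- ===== Notes on version B (the rewrite author's own statement) =====
-- stated objective: alternative
-- what changed: B builds a frequency table (dict) of exit codes in one pass and derives the verdict purely by arithmetic on four lookups (len, freq[130], freq[0], freq[None]), with the error count obtained by subtraction; A builds the codes and non_captured lists and rescans them with all/any/sum comprehensions.
import Mathlib
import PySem

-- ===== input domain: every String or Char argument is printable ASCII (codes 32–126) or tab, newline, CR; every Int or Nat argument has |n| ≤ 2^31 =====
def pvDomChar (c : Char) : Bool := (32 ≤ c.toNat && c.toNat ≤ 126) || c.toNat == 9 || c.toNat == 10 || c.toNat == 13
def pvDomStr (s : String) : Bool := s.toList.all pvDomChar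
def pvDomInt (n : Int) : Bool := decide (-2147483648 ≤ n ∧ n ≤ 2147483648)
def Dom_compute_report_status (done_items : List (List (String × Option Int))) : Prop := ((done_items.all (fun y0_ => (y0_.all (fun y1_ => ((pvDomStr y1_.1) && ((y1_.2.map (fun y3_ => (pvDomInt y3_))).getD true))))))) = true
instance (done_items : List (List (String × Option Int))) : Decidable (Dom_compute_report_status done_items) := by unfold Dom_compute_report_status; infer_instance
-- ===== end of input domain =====

-- B builds a frequency table of exit codes once and decides by arithmetic on four lookups,
-- instead of A's intermediate lists and all/any/sum rescans; return values identical.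

-- ===== PORT A =====
-- item.get("exit_code") : first-match lookup, None if absent (value type Option Int, so the result is the stored Option Int or none)
def pvGetCode (item : List (String × Option Int)) : Option Int :=
  PySem.Dict.getD (PySem.Dict.mk item) "exit_code" none

def compute_report_status (done_items : List (List (String × Option Int))) : String :=
  let codes := done_items.map (fun item => pvGetCode item)
  let non_captured := codes.filter (fun c => !(c == some 130))
  if !non_captured.isEmpty &&
     ((non_captured.filter (fun c => !(c == none))).all (fun c => c == some 0)) then "ok"
  else if codes.any (fun c => !(c == none || c == some 0 || c == some 130)) then
    let ok_count : Int := ((codes.filter (fun c => c == some 0 || c == some 130)).length : Int)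
    -- Python compares ok_count < len(codes)/2 (float); for integers this is exactly 2*ok_count < len(codes)
    if 2 * ok_count < (codes.length : Int) then "error" else "warning"
  else "warning"

-- ===== PORT B =====
def compute_report_status_alt (done_items : List (List (String × Option Int))) : String :=
  -- freq[c] = freq.get(c, 0) + 1 over items
  let freq := done_items.foldl
    (fun (d : PySem.Dict (Option Int) Int) item =>
      let c := pvGetCode item
      d.insert c (d.getD c 0 + 1))
    PySem.Dict.empty
  let n : Int := (done_items.length : Int)
  let n130 := freq.getD (some 130) 0
  let good := freq.getD (some 0) 0 + n130
  let n_err := n - good - freq.getD none 0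
  if n > n130 && n_err == 0 then "ok"
  else if n_err > 0 then (if good * 2 < n then "error" else "warning")
  else "warning"

-- ===== PRECONDITION & SPEC =====
def Spec_compute_report_status (done_items : List (List (String × Option Int))) (out : String) : Prop := out = compute_report_status_alt done_items
instance (done_items : List (List (String × Option Int))) (out : String) : Decidable (Spec_compute_report_status done_items out) := by unfold Spec_compute_report_status; infer_instance

-- ===== CLAIM (what is proved, stated in full; the proofs are below) =====
def Claim_equal_compute_report_status : Prop := ∀ (done_items : List (List (String × Option Int))), Dom_compute_report_status done_items → Spec_compute_report_status done_items (compute_report_status done_items)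

-- ===== LEMMAS AND PROOFS =====

-- A's chained filter+all over non-None non-130 codes is exactly "no error code occurs"
theorem filter_filter_all (cs : List (Option Int)) :
    ((cs.filter (fun x => !(x == some 130))).filter (fun x => !(x == none))).all (fun x => x == some 0)
    = (cs.countP (fun x => !(x == none) && !(x == some 0 || x == some 130)) == 0) := by
  induction cs with
  | nil => simp
  | cons h tl ih =>
    rcases h with _ | v
    · simpa using ih
    · by_cases h130 : v = 130
      · subst h130; simpa using ih
      · by_cases h0 : v = 0
        · subst h0; simpa using ih
        · simp [h130, h0]

theorem any_eq_countP_ne (cs : List (Option Int)) :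
    cs.any (fun x => !(x == none || x == some 0 || x == some 130))
    = !(cs.countP (fun x => !(x == none) && !(x == some 0 || x == some 130)) == 0) := by
  induction cs with
  | nil => simp
  | cons h tl ih =>
    rcases h with _ | v
    · simpa using ih
    · by_cases h130 : v = 130
      · subst h130; simpa using ih
      · by_cases h0 : v = 0
        · subst h0; simpa using ih
        · simp [h130, h0]

-- the four code categories partition the list
theorem count_partition (cs : List (Option Int)) :
    cs.length = cs.count none + cs.count (some 0) + cs.count (some 130)
      + cs.countP (fun x => !(x == none) && !(x == some 0 || x == some 130)) := by
  induction cs with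
  | nil => simp
  | cons h tl ih =>
    rcases h with _ | v
    · simp [List.count_cons, List.countP_cons, ih]; omega
    · by_cases h130 : v = 130
      · subst h130; simp [List.count_cons, List.countP_cons, ih]; omega
      · by_cases h0 : v = 0
        · subst h0; simp [List.count_cons, List.countP_cons, ih]; omega
        · simp [List.count_cons, List.countP_cons, h130, h0, ih]; omega

theorem countP_or_eq_add (cs : List (Option Int)) :
    cs.countP (fun x => x == some 0 || x == some 130)
    = cs.count (some 0) + cs.count (some 130) := by
  induction cs with
  | nil => simp
  | cons h tl ih =>
    rcases h with _ | v
    · simpa [List.count_cons, List.countP_cons] using ih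
    · by_cases h130 : v = 130
      · subst h130; simp [List.count_cons, List.countP_cons, ih]; omega
      · by_cases h0 : v = 0
        · subst h0; simp [List.count_cons, List.countP_cons, ih]; omega
        · simp [List.count_cons, List.countP_cons, h130, h0, ih]

-- B's frequency-building fold is the counter of the mapped code list
theorem freq_eq_counter (di : List (List (String × Option Int))) :
    di.foldl
      (fun (d : PySem.Dict (Option Int) Int) item =>
        d.insert (pvGetCode item) (d.getD (pvGetCode item) 0 + 1))
      PySem.Dict.empty
    = PySem.Dict.counter (di.map pvGetCode) := by
  rw [← PySem.Dict.foldl_insert_getD_add_one_eq_counter]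
  exact (List.foldl_map (f := pvGetCode)
    (g := fun (d : PySem.Dict (Option Int) Int) c => d.insert c (d.getD c 0 + 1))
    (l := di) (init := PySem.Dict.empty)).symm

-- ===== VERDICT (by name: the statement is the Claim_ definition above) =====
theorem compute_report_status_spec : Claim_equal_compute_report_status := by
  intro di _
  show compute_report_status di = compute_report_status_alt di
  unfold compute_report_status compute_report_status_alt
  dsimp only
  rw [freq_eq_counter]
  set cs := di.map pvGetCode with hcs
  have hlen : cs.length = di.length := by simp [hcs]
  have h130 : (PySem.Dict.counter cs).getD (some 130) 0 = (cs.count (some 130) : Int) :=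
    PySem.Dict.getD_counter ..
  have h0 : (PySem.Dict.counter cs).getD (some 0) 0 = (cs.count (some 0) : Int) :=
    PySem.Dict.getD_counter ..
  have hnone : (PySem.Dict.counter cs).getD none 0 = (cs.count none : Int) :=
    PySem.Dict.getD_counter ..
  rw [h130, h0, hnone]
  set n := cs.length with hn
  set k := cs.count (some 130) with hk
  set z := cs.count (some 0) with hz
  set m := cs.count none with hm
  set e := cs.countP (fun x => !(x == none) && !(x == some 0 || x == some 130)) with he
  have hpart : n = m + z + k + e := count_partition cs
  have hfl : (cs.filter (fun x => !(x == some 130))).length = n - k := by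
    rw [← List.countP_eq_length_filter]
    have h1 : cs.countP (fun x => !(x == some 130))
        = cs.countP (fun x => decide (¬ ((x == some 130) = true))) :=
      List.countP_congr (fun x _ => by simp)
    have h2 := List.length_eq_countP_add_countP (fun x : Option Int => x == some 130) (l := cs)
    have h3 : cs.countP (fun x : Option Int => x == some 130) = k := by
      rw [hk, List.count_eq_countP]
    omega
  have hisE : (cs.filter (fun x => !(x == some 130))).isEmpty = decide (n - k = 0) := by
    have h0' : (cs.filter (fun x => !(x == some 130))).isEmpty
        = decide ((cs.filter (fun x => !(x == some 130))).length = 0) := by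
      cases cs.filter (fun x => !(x == some 130)) <;> simp
    rw [h0', hfl]
  have hok : (cs.filter (fun x => x == some 0 || x == some 130)).length = z + k := by
    rw [← List.countP_eq_length_filter, countP_or_eq_add]
  rw [filter_filter_all, any_eq_countP_ne, hisE, hok, ← hlen]
  have hkn : k ≤ n := List.count_le_length
  split_ifs <;>
    first
      | rfl
      | (exfalso;
         simp only [Bool.and_eq_true, Bool.not_eq_true', Bool.not_eq_true,
           decide_eq_true_eq, decide_eq_false_iff_not, beq_iff_eq, beq_eq_false_iff_ne,
           ne_eq, gt_iff_lt, not_lt, not_and, not_not] at *;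
         push_cast at *
         omega)
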